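-- pv_equiv track=rewrite | github.com/alexandraback/datacollection | solutions_2463486_1/Python/Werkov/palind.py | unders
-- ===== SOURCE A (Python) =====
-- def palind(N=999999):
--     prev_l = 0
--     stack = ['']
--
--     for i in range(1,N+1):
--         l = len(str(i))
--         # empty the stack
--         if l > prev_l:
--             for n in stack:
--                 r = n[::-1]
--                 for m in range(10):
--                     p = (n + str(m) + r)
--                     yield p
--             stack = []
--
--         i = str(i)
--         r = i[::-1]
--         stack.append(i)
--         p = (i + r)
--         yield p
--         prev_l = l
--
-- def unders(N):
--     result = 0
--     for p in palind():
--         p = int(p)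
--         pp = p*p
--         if pp > N:
--             break
--         pp = str(pp)
--         if pp == pp[::-1]:
--             result += 1
--     return result
-- ===== SOURCE B (Python) =====
-- def unders(N):
--     result = 0
--     for length in range(1, 13):
--         h = (length + 1) // 2
--         start = 0 if length == 1 else 10 ** (h - 1)
--         for half in range(start, 10 ** h):
--             s = str(half)
--             p = int(s + s[::-1][length % 2:])
--             pp = p * p
--             if pp > N:
--                 return result
--             t = str(pp)
--             if t == t[::-1]:
--                 result += 1
--     return result
-- ===== Notes on version B (the rewrite author's own statement) =====
-- stated objective: simpler
-- what changed: Replaces A's counter-driven generator (a stack of number strings flushed in batches to emit odd-length palindromes, interleaved with even-length ones) by direct half-construction: for each length 1..12, palindromic roots are built by mirroring their first half in increasing order, with the same monotone early exit when p*p > N.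
import Mathlib
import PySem

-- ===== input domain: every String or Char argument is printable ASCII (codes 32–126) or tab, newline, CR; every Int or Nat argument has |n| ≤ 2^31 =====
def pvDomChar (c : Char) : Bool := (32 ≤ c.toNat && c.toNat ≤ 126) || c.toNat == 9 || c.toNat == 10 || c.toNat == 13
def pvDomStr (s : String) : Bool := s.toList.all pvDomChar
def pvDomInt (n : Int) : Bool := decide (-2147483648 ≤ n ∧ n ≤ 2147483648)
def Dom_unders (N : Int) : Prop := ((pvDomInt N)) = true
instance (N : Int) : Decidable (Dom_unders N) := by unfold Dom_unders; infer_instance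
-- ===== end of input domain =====

-- B replaces A's counter-driven stack/flush palindrome generator with direct
-- half-construction of palindromic roots by length (simpler enumeration, same values).

-- ===== PORT A =====
-- A consumes the lazy generator `palind()` and breaks out of the loop, so the port
-- fuses the generator with the consuming loop: `Sum.inl r` = the loop broke with
-- final result r, `Sum.inr r` = keep consuming with running result r.
-- Strings are carried as List Char (PySem.Chars); s[::-1] is List.reverse
-- (PySem.List.slice?_none_none_neg_one), int(p) is PySem.Int.ofChars? (always
-- `some` here: every yielded p is a nonempty digit string), str is PySem.Int.toChars.

-- body of `for p in palind(): ...` for one yielded palindrome p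
def undersStep (N res : Int) (p : List Char) : Int ⊕ Int :=
  let pv := (PySem.Int.ofChars? p).getD 0       -- p = int(p)
  let pp := pv * pv
  if N < pp then Sum.inl res                    -- if pp > N: break
  else
    let t := PySem.Int.toChars pp               -- pp = str(pp)
    if t = t.reverse then Sum.inr (res + 1)     -- if pp == pp[::-1]: result += 1
    else Sum.inr res

-- `for m in range(10): yield n + str(m) + r` consumed by the loop
def undersFlushInner (N : Int) (n r : List Char) (ms : List Int) (res : Int) : Int ⊕ Int :=
  match ms with
  | [] => Sum.inr res
  | m :: rest =>
    match undersStep N res (n ++ PySem.Int.toChars m ++ r) with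
    | Sum.inl res' => Sum.inl res'
    | Sum.inr res' => undersFlushInner N n r rest res'

-- `for n in stack: ...` (the stack flush) consumed by the loop
def undersFlush (N : Int) (stack : List (List Char)) (res : Int) : Int ⊕ Int :=
  match stack with
  | [] => Sum.inr res
  | n :: rest =>
    match undersFlushInner N n n.reverse (PySem.List.pyRange 0 10 1) res with
    | Sum.inl res' => Sum.inl res'
    | Sum.inr res' => undersFlush N rest res'

-- `for i in range(1, N+1): ...` of palind (generator state prev_l, stack) fused
-- with the consuming loop
def undersLoop (N : Int) (is : List Int) (prevl : Int) (stack : List (List Char)) (res : Int) : Int :=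
  match is with
  | [] => res
  | i :: rest =>
    let s := PySem.Int.toChars i                -- i = str(i); l = len(str(i))
    if prevl < (s.length : Int) then            -- if l > prev_l: empty the stack
      match undersFlush N stack res with
      | Sum.inl r => r
      | Sum.inr res1 =>
        match undersStep N res1 (s ++ s.reverse) with   -- yield i + i[::-1]
        | Sum.inl r => r
        | Sum.inr res2 => undersLoop N rest (s.length : Int) [s] res2
    else
      match undersStep N res (s ++ s.reverse) with
      | Sum.inl r => r
      | Sum.inr res2 => undersLoop N rest (s.length : Int) (stack ++ [s]) res2

def unders (N : Int) : Int :=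
  undersLoop N (PySem.List.pyRange 1 1000000 1) 0 [[]] 0   -- range(1, 999999+1); stack = ['']

-- ===== PORT B =====
-- Source B: enumerate palindromic roots by half-construction, increasing; early return on pp > N.

-- `for half in range(start, 10**h): ...` with early return (Sum.inl = returned)
def undersAltInner (N L : Int) (halves : List Int) (res : Int) : Int ⊕ Int :=
  match halves with
  | [] => Sum.inr res
  | half :: rest =>
    let s := PySem.Int.toChars half             -- s = str(half)
    -- p = int(s + s[::-1][length % 2:])  (always a valid digit string)
    let p := (PySem.Int.ofChars? (s ++ PySem.List.slice s.reverse (some (PySem.Int.mod L 2)) none)).getD 0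
    let pp := p * p
    if N < pp then Sum.inl res                  -- if pp > N: return result
    else
      let t := PySem.Int.toChars pp
      if t = t.reverse then undersAltInner N L rest (res + 1)
      else undersAltInner N L rest res

-- `for length in range(1, 13): ...`
def undersAltOuter (N : Int) (lengths : List Int) (res : Int) : Int :=
  match lengths with
  | [] => res
  | L :: rest =>
    let h := PySem.Int.floordiv (L + 1) 2       -- h = (length + 1) // 2  (h ≥ 1 here)
    let start : Int := if L = 1 then 0 else 10 ^ (h - 1).toNat   -- 10 ** (h-1)
    match undersAltInner N L (PySem.List.pyRange start (10 ^ h.toNat) 1) res with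
    | Sum.inl res' => res'
    | Sum.inr res' => undersAltOuter N rest res'

def unders_alt (N : Int) : Int :=
  undersAltOuter N (PySem.List.pyRange 1 13 1) 0

-- ===== PRECONDITION & SPEC =====
def Spec_unders (N : Int) (out : Int) : Prop := out = unders_alt N
instance (N : Int) (out : Int) : Decidable (Spec_unders N out) := by unfold Spec_unders; infer_instance

-- ===== CLAIM (what is proved, stated in full; the proofs are below) =====
def Claim_equal_unders : Prop := ∀ (N : Int), Dom_unders N → Spec_unders N (unders N)

-- ===== LEMMAS AND PROOFS =====

-- the generic "consume palindromes until break" fold both ports fuse into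
def countB (N : Int) (L : List (List Char)) (res : Int) : Int ⊕ Int :=
  match L with
  | [] => Sum.inr res
  | p :: rest =>
    match undersStep N res p with
    | Sum.inl r => Sum.inl r
    | Sum.inr r => countB N rest r

def runC (N : Int) (L : List (List Char)) (res : Int) : Int :=
  match countB N L res with
  | Sum.inl r => r
  | Sum.inr r => r

-- the palindromes A's generator yields (N-free), mirroring undersLoop's structure
def flushOut (stack : List (List Char)) : List (List Char) :=
  stack.flatMap (fun n => (PySem.List.pyRange 0 10 1).map (fun m => n ++ PySem.Int.toChars m ++ n.reverse))

def genA (is : List Int) (prevl : Int) (stack : List (List Char)) : List (List Char) :=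
  match is with
  | [] => []
  | i :: rest =>
    let s := PySem.Int.toChars i
    if prevl < (s.length : Int) then
      flushOut stack ++ (s ++ s.reverse) :: genA rest (s.length : Int) [s]
    else
      (s ++ s.reverse) :: genA rest (s.length : Int) (stack ++ [s])

-- the palindromes B enumerates (N-free), mirroring undersAltOuter/Inner
def genBlen (L : Int) : List (List Char) :=
  let h := PySem.Int.floordiv (L + 1) 2
  let start : Int := if L = 1 then 0 else 10 ^ (h - 1).toNat
  (PySem.List.pyRange start (10 ^ h.toNat) 1).map
    (fun half =>
      let s := PySem.Int.toChars half
      s ++ PySem.List.slice s.reverse (some (PySem.Int.mod L 2)) none)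

def genB (lengths : List Int) : List (List Char) := lengths.flatMap genBlen

theorem countB_append (N : Int) (L1 L2 : List (List Char)) (res : Int) :
    countB N (L1 ++ L2) res =
      match countB N L1 res with
      | Sum.inl r => Sum.inl r
      | Sum.inr r => countB N L2 r := by
  induction L1 generalizing res with
  | nil => simp [countB]
  | cons p t ih =>
    simp only [List.cons_append, countB]
    cases undersStep N res p with
    | inl r => rfl
    | inr r => exact ih r

theorem flushInner_fusion (N : Int) (n r : List Char) (ms : List Int) (res : Int) :
    undersFlushInner N n r ms res =
      countB N (ms.map (fun m => n ++ PySem.Int.toChars m ++ r)) res := by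
  induction ms generalizing res with
  | nil => rfl
  | cons m rest ih =>
    simp only [undersFlushInner, List.map_cons, countB]
    cases undersStep N res (n ++ PySem.Int.toChars m ++ r) with
    | inl r' => rfl
    | inr r' => exact ih r'

theorem flush_fusion (N : Int) (stack : List (List Char)) (res : Int) :
    undersFlush N stack res = countB N (flushOut stack) res := by
  induction stack generalizing res with
  | nil => rfl
  | cons n rest ih =>
    simp only [undersFlush, flushOut, List.flatMap_cons]
    rw [countB_append, ← flushInner_fusion]
    cases undersFlushInner N n n.reverse (PySem.List.pyRange 0 10 1) res with
    | inl r' => rfl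
    | inr r' => simpa [flushOut] using ih r'

theorem loopA_fusion (N : Int) (is : List Int) (prevl : Int)
    (stack : List (List Char)) (res : Int) :
    undersLoop N is prevl stack res = runC N (genA is prevl stack) res := by
  induction is generalizing prevl stack res with
  | nil => rfl
  | cons i rest ih =>
    simp only [undersLoop, genA]
    by_cases h : prevl < ((PySem.Int.toChars i).length : Int)
    · rw [if_pos h, if_pos h, flush_fusion, runC, countB_append]
      cases countB N (flushOut stack) res with
      | inl r => rfl
      | inr res1 =>
        simp only [countB]
        cases undersStep N res1 (PySem.Int.toChars i ++ (PySem.Int.toChars i).reverse) with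
        | inl r => rfl
        | inr res2 => exact ih _ _ res2
    · rw [if_neg h, if_neg h, runC, countB]
      cases undersStep N res (PySem.Int.toChars i ++ (PySem.Int.toChars i).reverse) with
      | inl r => rfl
      | inr res2 => exact ih _ _ res2

theorem genA_append (is1 is2 : List Int) (prevl : Int) (stack : List (List Char)) :
    ∃ p' st', genA (is1 ++ is2) prevl stack = genA is1 prevl stack ++ genA is2 p' st' := by
  induction is1 generalizing prevl stack with
  | nil => exact ⟨prevl, stack, rfl⟩
  | cons i rest ih =>
    simp only [List.cons_append, genA]
    by_cases h : prevl < ((PySem.Int.toChars i).length : Int)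
    · rw [if_pos h, if_pos h]
      obtain ⟨p', st', hps⟩ := ih ((PySem.Int.toChars i).length : Int) [PySem.Int.toChars i]
      exact ⟨p', st', by rw [hps]; simp⟩
    · rw [if_neg h, if_neg h]
      obtain ⟨p', st', hps⟩ := ih ((PySem.Int.toChars i).length : Int) (stack ++ [PySem.Int.toChars i])
      exact ⟨p', st', by rw [hps]; simp⟩

theorem altInner_fusion (N L : Int) (halves : List Int) (res : Int) :
    undersAltInner N L halves res =
      countB N (halves.map (fun half =>
        let s := PySem.Int.toChars half
        s ++ PySem.List.slice s.reverse (some (PySem.Int.mod L 2)) none)) res := by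
  induction halves generalizing res with
  | nil => rfl
  | cons half rest ih =>
    simp only [undersAltInner, List.map_cons, countB, undersStep]
    split
    · rfl
    · split <;> exact ih _

theorem loopB_fusion (N : Int) (lengths : List Int) (res : Int) :
    undersAltOuter N lengths res = runC N (genB lengths) res := by
  induction lengths generalizing res with
  | nil => rfl
  | cons L rest ih =>
    simp only [undersAltOuter, genB, List.flatMap_cons]
    rw [altInner_fusion, runC, countB_append]
    show _ = (match (match countB N (genBlen L) res with
              | Sum.inl r => Sum.inl r
              | Sum.inr r => countB N (rest.flatMap genBlen) r : Int ⊕ Int) with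
              | Sum.inl r => r | Sum.inr r => r)
    rw [show countB N ((PySem.List.pyRange (if L = 1 then 0 else 10 ^ (PySem.Int.floordiv (L + 1) 2 - 1).toNat) (10 ^ (PySem.Int.floordiv (L + 1) 2).toNat) 1).map
        (fun half => PySem.Int.toChars half ++ PySem.List.slice (PySem.Int.toChars half).reverse (some (PySem.Int.mod L 2)) none)) res = countB N (genBlen L) res from rfl]
    cases countB N (genBlen L) res with
    | inl r => rfl
    | inr r => exact ih r

-- value of a yielded palindrome string
def pvVal (p : List Char) : Int := (PySem.Int.ofChars? p).getD 0

theorem countB_break (N : Int) (L R : List (List Char)) (res : Int)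
    (h : ∃ p ∈ L, N < pvVal p * pvVal p) :
    countB N (L ++ R) res = countB N L res := by
  induction L generalizing res with
  | nil => simp at h
  | cons p t ih =>
    simp only [List.cons_append, countB]
    by_cases hb : N < pvVal p * pvVal p
    · rw [show undersStep N res p = Sum.inl res from by
        simp [undersStep, pvVal] at hb ⊢; omega]
    · cases hs : undersStep N res p with
      | inl r =>
        exfalso
        simp only [undersStep] at hs
        split at hs
        · exact hb (by simpa [pvVal] using ‹_›)
        · split at hs <;> simp_all
      | inr r =>
        obtain ⟨q, hq, hqv⟩ := h
        rcases List.mem_cons.mp hq with rfl | hq'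
        · exact absurd hqv hb
        · exact ih r ⟨q, hq', hqv⟩

theorem countB_take (N : Int) (L : List (List Char)) (k : Nat) (res : Int)
    (h : ∃ p ∈ L.take k, N < pvVal p * pvVal p) :
    countB N L res = countB N (L.take k) res := by
  conv_lhs => rw [← List.take_append_drop k L]
  exact countB_break N (L.take k) (L.drop k) res h

-- the shared prefix: the first 563 palindromes (0 … 46364) in both enumerations
set_option maxRecDepth 40000 in
theorem prefix_eq :
    (genA (PySem.List.pyRange 1 101 1) 0 [[]]).take 563
      = (genB (PySem.List.pyRange 1 6 1)).take 563 := by decide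

set_option maxRecDepth 40000 in
theorem breaker_memA :
    ['4','6','3','6','4'] ∈ (genA (PySem.List.pyRange 1 101 1) 0 [[]]).take 563 := by decide

theorem breaker_val : pvVal ['4','6','3','6','4'] = 46364 := by decide

-- ===== VERDICT (by name: the statement is the Claim_ definition above) =====
theorem unders_spec : Claim_equal_unders := by
  intro N hDom
  have hN : N ≤ 2147483648 := by
    simp only [Dom_unders, pvDomInt, decide_eq_true_eq] at hDom; exact hDom.2
  have hbrk : N < pvVal ['4','6','3','6','4'] * pvVal ['4','6','3','6','4'] := by
    rw [breaker_val]; omega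
  -- A side
  have hsplitA : PySem.List.pyRange 1 1000000 1
      = PySem.List.pyRange 1 101 1 ++ PySem.List.pyRange 101 1000000 1 :=
    PySem.List.pyRange_one_append 1 101 1000000 (by norm_num) (by norm_num)
  obtain ⟨p', st', hga⟩ := genA_append (PySem.List.pyRange 1 101 1)
      (PySem.List.pyRange 101 1000000 1) 0 [[]]
  have hA : countB N (genA (PySem.List.pyRange 1 1000000 1) 0 [[]]) 0
      = countB N ((genA (PySem.List.pyRange 1 101 1) 0 [[]]).take 563) 0 := by
    rw [hsplitA, hga,
      countB_break N _ _ 0 ⟨_, List.take_subset _ _ breaker_memA, hbrk⟩,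
      countB_take N _ 563 0 ⟨_, breaker_memA, hbrk⟩]
  -- B side
  have hsplitB : PySem.List.pyRange 1 13 1
      = PySem.List.pyRange 1 6 1 ++ PySem.List.pyRange 6 13 1 :=
    PySem.List.pyRange_one_append 1 6 13 (by norm_num) (by norm_num)
  have hmemB : ['4','6','3','6','4'] ∈ (genB (PySem.List.pyRange 1 6 1)).take 563 := by
    rw [← prefix_eq]; exact breaker_memA
  have hB : countB N (genB (PySem.List.pyRange 1 13 1)) 0
      = countB N ((genB (PySem.List.pyRange 1 6 1)).take 563) 0 := by
    rw [hsplitB, show genB (PySem.List.pyRange 1 6 1 ++ PySem.List.pyRange 6 13 1)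
        = genB (PySem.List.pyRange 1 6 1) ++ genB (PySem.List.pyRange 6 13 1) from
        List.flatMap_append,
      countB_break N _ _ 0 ⟨_, List.take_subset _ _ hmemB, hbrk⟩,
      countB_take N _ 563 0 ⟨_, hmemB, hbrk⟩]
  show unders N = unders_alt N
  rw [unders, unders_alt, loopA_fusion, loopB_fusion, runC, runC, hA, hB, prefix_eq]
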